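-- pv_equiv track=rewrite | github.com/Arsen1302/Code-copy-detector | TestData/solutions/problem_570_5.py | solution_570_5
-- ===== SOURCE A (Python) =====
-- from typing import List
--
-- def solution_570_5(grid: List[List[int]]) -> int:
--     t,s,f=0,0,0
--     for i in range(len(grid)):
--         maxRow,maxCol=0,0
--         for j in range(len(grid[i])):
--             if grid[i][j]>0:
--                 t+=1
--             maxRow=max(grid[i][j],maxRow)
--             maxCol=max(grid[j][i],maxCol)
--         s+=maxRow
--         f+=maxCol
--     return t+s+f
-- ===== SOURCE B (Python) =====
-- from typing import List
--
-- def solution_570_5(grid: List[List[int]]) -> int: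
--     # one counting pass over the rows, then one transposed pass that reads each
--     # cell once as grid[j][i]: it gathers the max of column i directly and
--     # scatters the cell into a running array of row maxes.
--     n = len(grid)
--     t = sum(1 for row in grid for v in row if v > 0)
--     rowmax = [0] * n
--     f = 0
--     for i in range(n):
--         mc = 0
--         for j in range(len(grid[i])):
--             v = grid[j][i]
--             if v > mc:
--                 mc = v
--             if v > rowmax[j]:
--                 rowmax[j] = v
--         f += mc
--     return t + f + sum(rowmax)
-- ===== Notes on version B (the rewrite author's own statement) =====
-- stated objective: faster
-- what changed: A's fused loop reads every cell twice through subscripts (grid[i][j] for the row max and grid[j][i] for the column max) with scalar accumulators; B counts positives in a separate builtin-sum pass and then makes one transposed pass that reads each cell once as grid[j][i], gathering each column max directly while scattering the cell into a running array of row maxes that is summed at the end.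
import Mathlib
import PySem

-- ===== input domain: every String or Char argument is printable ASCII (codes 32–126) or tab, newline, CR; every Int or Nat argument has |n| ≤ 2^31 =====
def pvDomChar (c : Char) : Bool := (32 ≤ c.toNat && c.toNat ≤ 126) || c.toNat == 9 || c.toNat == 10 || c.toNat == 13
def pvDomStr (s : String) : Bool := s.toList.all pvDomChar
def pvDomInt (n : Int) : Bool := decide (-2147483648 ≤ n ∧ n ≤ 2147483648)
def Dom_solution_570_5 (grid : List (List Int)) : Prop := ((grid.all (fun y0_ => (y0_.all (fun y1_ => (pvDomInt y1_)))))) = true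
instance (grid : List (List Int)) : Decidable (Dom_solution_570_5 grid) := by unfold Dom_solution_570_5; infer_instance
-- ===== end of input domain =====

-- B counts positives in one pass over the rows, then makes one transposed pass that reads each
-- cell once as grid[j][i], gathering each column max directly and scattering the cell into a
-- running array of row maxes (A's fused loop reads every cell twice, as grid[i][j] and grid[j][i]).

-- ===== PORT A =====
def solution_570_5 (grid : List (List Int)) : Int :=
  let r :=
    (List.range grid.length).foldl
      (fun (acc : Int × Int × Int) i =>
        let inner :=
          (List.range (grid.getD i []).length).foldl
            (fun (st : Int × Int × Int) j =>
              (if (grid.getD i []).getD j 0 > 0 then st.1 + 1 else st.1,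
               max ((grid.getD i []).getD j 0) st.2.1,
               max ((grid.getD j []).getD i 0) st.2.2))
            (acc.1, 0, 0)
        (inner.1, acc.2.1 + inner.2.1, acc.2.2 + inner.2.2))
      (0, 0, 0)
  r.1 + r.2.1 + r.2.2

-- ===== PORT B =====
-- rowmax[j] reads/writes are in range whenever Pre_ holds (j < n there); getD/set are exact on
-- that domain.
def solution_570_5_alt (grid : List (List Int)) : Int :=
  let n := grid.length
  let t := grid.foldl (fun t row => row.foldl (fun t v => if v > 0 then t + 1 else t) t) 0
  let st :=
    (List.range n).foldl
      (fun (st : Int × List Int) i =>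
        let inner :=
          (List.range (grid.getD i []).length).foldl
            (fun (q : Int × List Int) j =>
              let v := (grid.getD j []).getD i 0
              (if v > q.1 then v else q.1,
               if v > q.2.getD j 0 then q.2.set j v else q.2))
            (0, st.2)
        (st.1 + inner.1, inner.2))
      (0, List.replicate n 0)
  t + st.1 + st.2.sum

-- ===== PRECONDITION & SPEC =====
-- Pre_ excludes exactly the ragged grids on which both Pythons raise IndexError at grid[j][i].
def Pre_solution_570_5 (grid : List (List Int)) : Prop :=
  ∀ i < grid.length, ∀ j < (grid.getD i []).length, j < grid.length ∧ i < (grid.getD j []).length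
instance (grid : List (List Int)) : Decidable (Pre_solution_570_5 grid) := by unfold Pre_solution_570_5; infer_instance
def pvWitness_solution_570_5 : List (List Int) := [[1, -2], [3, 4]]
def Spec_solution_570_5 (grid : List (List Int)) (out : Int) : Prop := out = solution_570_5_alt grid
instance (grid : List (List Int)) (out : Int) : Decidable (Spec_solution_570_5 grid out) := by unfold Spec_solution_570_5; infer_instance

-- ===== CLAIM (what is proved, stated in full; the proofs are below) =====
def Claim_equal_solution_570_5 : Prop := ∀ (grid : List (List Int)), Dom_solution_570_5 grid → Pre_solution_570_5 grid → Spec_solution_570_5 grid (solution_570_5 grid)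

-- ===== LEMMAS AND PROOFS =====

-- abbreviations used only by the proofs
def pvL (grid : List (List Int)) (j : Nat) : Nat := (grid.getD j []).length
def pvV (grid : List (List Int)) (j i : Nat) : Int := (grid.getD j []).getD i 0
-- one scatter step: raise slot k of c to val k if it is larger
def pvUpd (val : Nat → Int) (c : List Int) (k : Nat) : List Int :=
  if val k > c.getD k 0 then c.set k (val k) else c
-- row maxes accumulated by B after its first k (column) iterations
def pvG (grid : List (List Int)) : Nat → Nat → Int
  | 0, _ => 0
  | i+1, j => if j < pvL grid i then max (pvG grid i j) (pvV grid j i) else pvG grid i j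

-- a fold whose triple state components are updated independently splits into three folds
theorem pv_foldl_triple {α β γ δ : Type} (l : List δ) (u : α → δ → α) (v : β → δ → β)
    (w : γ → δ → γ) (a : α) (b : β) (c : γ) :
    l.foldl (fun st x => (u st.1 x, v st.2.1 x, w st.2.2 x)) (a, b, c)
      = (l.foldl u a, l.foldl v b, l.foldl w c) := by
  induction l generalizing a b c with
  | nil => rfl
  | cons x xs ih => simp [List.foldl_cons, ih]

-- a fold whose pair state components are updated independently splits into two folds
theorem pv_foldl_pair {α β δ : Type} (l : List δ) (u : α → δ → α) (w : β → δ → β)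
    (a : α) (b : β) :
    l.foldl (fun st x => (u st.1 x, w st.2 x)) (a, b) = (l.foldl u a, l.foldl w b) := by
  induction l generalizing a b with
  | nil => rfl
  | cons x xs ih => simp [List.foldl_cons, ih]

-- folding over range of indices with getD is folding over the list itself
theorem pv_foldl_range_getD {α β : Type} (xs : List α) (d : α) (g : β → α → β) (b : β) :
    (List.range xs.length).foldl (fun acc j => g acc (xs.getD j d)) b = xs.foldl g b := by
  induction xs generalizing b with
  | nil => rfl
  | cons x rest ih =>
      simp only [List.length_cons, List.range_succ_eq_map, List.foldl_cons, List.foldl_map,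
        List.getD_cons_zero, List.getD_cons_succ]
      exact ih (g b x)

theorem pv_ite_max (v m : Int) : (if v > m then v else m) = max m v := by
  rw [max_def]; split_ifs <;> omega

theorem pv_max_flip (v m : Int) : max v m = max m v := max_comm v m

theorem pv_getD_set_self (l : List Int) (i : Nat) (a : Int) (h : i < l.length) :
    (l.set i a).getD i 0 = a := by
  simp [List.getD, h]

-- length is preserved by the scatter fold
theorem pv_scat_length (val : Nat → Int) (l : List Nat) (c : List Int) :
    (l.foldl (pvUpd val) c).length = c.length := by
  induction l generalizing c with
  | nil => rfl
  | cons i l ih => simp only [List.foldl_cons, ih]; unfold pvUpd; split <;> simp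

-- pointwise value of the scatter fold over the first k slots
theorem pv_scat_getD (val : Nat → Int) (k : Nat) (c : List Int) (i : Nat) :
    ((List.range k).foldl (pvUpd val) c).getD i 0
      = if i < k ∧ i < c.length then max (c.getD i 0) (val i) else c.getD i 0 := by
  induction k with
  | zero => simp
  | succ k ih =>
      rw [List.range_succ, List.foldl_append, List.foldl_cons, List.foldl_nil]
      have hlen : ((List.range k).foldl (pvUpd val) c).length = c.length := pv_scat_length ..
      by_cases hik : i = k
      · subst hik
        have hself : ((List.range i).foldl (pvUpd val) c).getD i 0 = c.getD i 0 := by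
          rw [ih]; simp
        simp only [pvUpd]
        by_cases hlt : i < c.length
        · rw [if_pos (⟨by omega, hlt⟩ : i < i + 1 ∧ i < c.length)]
          split
          · rename_i hcmp
            rw [hself] at hcmp
            rw [pv_getD_set_self _ _ _ (by omega), max_eq_right (le_of_lt hcmp)]
          · rename_i hcmp
            rw [hself] at hcmp
            rw [hself, max_eq_left (by omega)]
        · rw [if_neg (by omega : ¬(i < i + 1 ∧ i < c.length))]
          have hno : ((List.range i).foldl (pvUpd val) c).set i (val i)
              = (List.range i).foldl (pvUpd val) c :=
            List.set_eq_of_length_le (by omega)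
          split <;> simp only [hno, hself]
      · have hset : ∀ (l : List Int) (a : Int), (l.set k a).getD i 0 = l.getD i 0 := by
          intro l a
          simp [List.getD, List.getElem?_set_ne (fun h => hik h.symm)]
        have hcond : (i < k + 1 ∧ i < c.length) ↔ (i < k ∧ i < c.length) := by omega
        simp only [pvUpd]
        split <;> [rw [hset, ih, if_congr hcond rfl rfl]; rw [ih, if_congr hcond rfl rfl]]

-- length of the row-max array is invariant
theorem pv_rowmax_length (grid : List (List Int)) (k : Nat) :
    ((List.range k).foldl
        (fun c i => (List.range (grid.getD i []).length).foldl
          (pvUpd (fun j => (grid.getD j []).getD i 0)) c)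
        (List.replicate grid.length 0)).length = grid.length := by
  induction k with
  | zero => simp
  | succ k ih =>
      rw [List.range_succ, List.foldl_append, List.foldl_cons, List.foldl_nil,
        pv_scat_length, ih]

-- the row-max array after B's first k column iterations
theorem pv_rowmax_inv (grid : List (List Int)) (k : Nat) (j : Nat) :
    (((List.range k).foldl
        (fun c i => (List.range (grid.getD i []).length).foldl
          (pvUpd (fun j => (grid.getD j []).getD i 0)) c)
        (List.replicate grid.length 0)).getD j 0)
      = if j < grid.length then pvG grid k j else 0 := by
  induction k with
  | zero =>
      simp only [List.range_zero, List.foldl_nil, pvG, List.getD, List.getElem?_replicate]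
      split <;> rfl
  | succ k ih =>
      rw [List.range_succ, List.foldl_append, List.foldl_cons, List.foldl_nil,
        pv_scat_getD, pv_rowmax_length, ih]
      by_cases hin : j < grid.length
      · simp only [hin, if_true, and_true]
        by_cases hr : j < (grid.getD k []).length
        · simp only [pvG, pvL, pvV, hr, if_true]
        · simp only [pvG, pvL, hr, if_false]
      · simp [hin]

-- under Pre_, B's accumulated row max equals A's gather over row j
theorem pv_G_eq_gather (grid : List (List Int)) (h : Pre_solution_570_5 grid)
    (j : Nat) (hj : j < grid.length) (k : Nat) (hk : k ≤ grid.length) :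
    pvG grid k j
      = (List.range (min k (pvL grid j))).foldl (fun m i => max m (pvV grid j i)) 0 := by
  have hiff : ∀ i, i < grid.length → (j < pvL grid i ↔ i < pvL grid j) := by
    intro i hi
    constructor
    · intro hji; exact (h i hi j hji).2
    · intro hij; exact (h j hj i hij).2
  induction k with
  | zero => simp [pvG]
  | succ k ih =>
      have hk' : k ≤ grid.length := by omega
      have hkn : k < grid.length := by omega
      by_cases hc : j < pvL grid k
      · have hkLj : k < pvL grid j := (hiff k hkn).mp hc
        have hmin1 : min (k+1) (pvL grid j) = k + 1 := by omega
        have hmin2 : min k (pvL grid j) = k := by omega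
        simp only [pvG, hc, if_true, hmin1]
        rw [List.range_succ, List.foldl_append, List.foldl_cons, List.foldl_nil,
          ih hk', hmin2]
      · have hkLj : ¬ k < pvL grid j := fun hh => hc ((hiff k hkn).mpr hh)
        have hmin : min (k+1) (pvL grid j) = min k (pvL grid j) := by omega
        simp only [pvG, hc, if_false, hmin]
        exact ih hk'

theorem pv_L_le (grid : List (List Int)) (h : Pre_solution_570_5 grid)
    (i : Nat) (hi : i < grid.length) : pvL grid i ≤ grid.length := by
  unfold pvL
  by_contra hgt
  exact absurd (h i hi grid.length (by omega)).1 (by omega)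

theorem pv_foldl_add_shift (l : List Int) (a : Int) :
    l.foldl (fun a x => a + x) a = a + l.foldl (fun a x => a + x) 0 := by
  induction l generalizing a with
  | nil => simp
  | cons y ys ih => simp only [List.foldl_cons]; rw [ih, ih (0 + y)]; ring

-- sum of a list as a fold over its indices
theorem pv_sum_range (l : List Int) :
    l.sum = (List.range l.length).foldl (fun a i => a + l.getD i 0) 0 := by
  rw [pv_foldl_range_getD l 0 (fun a x => a + x) 0]
  induction l with
  | nil => rfl
  | cons x xs ih =>
      simp only [List.sum_cons, List.foldl_cons]
      rw [ih, pv_foldl_add_shift xs (0 + x)]; ring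

theorem pv_foldl_add_congr (n : Nat) (f g : Nat → Int)
    (h : ∀ i, i < n → f i = g i) :
    (List.range n).foldl (fun a i => a + f i) 0 = (List.range n).foldl (fun a i => a + g i) 0 := by
  refine PySem.List.foldl_congr_mem _ _ _ _ ?_
  intro a i hi
  rw [h i (List.mem_range.mp hi)]

-- the inner fold of A, split into three independent folds
theorem pv_inner_A (grid : List (List Int)) (i : Nat) (a : Int) :
    (List.range (grid.getD i []).length).foldl
        (fun (st : Int × Int × Int) j =>
          (if (grid.getD i []).getD j 0 > 0 then st.1 + 1 else st.1,
           max ((grid.getD i []).getD j 0) st.2.1,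
           max ((grid.getD j []).getD i 0) st.2.2))
        (a, 0, 0)
      = ((List.range (grid.getD i []).length).foldl
            (fun t j => if (grid.getD i []).getD j 0 > 0 then t + 1 else t) a,
         (List.range (grid.getD i []).length).foldl
            (fun m j => max m ((grid.getD i []).getD j 0)) 0,
         (List.range (grid.getD i []).length).foldl
            (fun m j => max m ((grid.getD j []).getD i 0)) 0) := by
  rw [pv_foldl_triple (List.range (grid.getD i []).length)
      (fun t j => if (grid.getD i []).getD j 0 > 0 then t + 1 else t)
      (fun m j => max ((grid.getD i []).getD j 0) m)
      (fun m j => max ((grid.getD j []).getD i 0) m) a 0 0]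
  refine congrArg₂ _ rfl (congrArg₂ _ ?_ ?_) <;>
    · refine PySem.List.foldl_congr_mem _ _ _ _ ?_
      intro m j _
      rw [pv_max_flip]

-- the inner fold of B, split into two independent folds
theorem pv_inner_B (grid : List (List Int)) (i : Nat) (c : List Int) :
    (List.range (grid.getD i []).length).foldl
        (fun (q : Int × List Int) j =>
          (if (grid.getD j []).getD i 0 > q.1 then (grid.getD j []).getD i 0 else q.1,
           if (grid.getD j []).getD i 0 > q.2.getD j 0 then q.2.set j ((grid.getD j []).getD i 0)
             else q.2))
        (0, c)
      = ((List.range (grid.getD i []).length).foldl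
            (fun m j => max m ((grid.getD j []).getD i 0)) 0,
         (List.range (grid.getD i []).length).foldl
            (pvUpd (fun j => (grid.getD j []).getD i 0)) c) := by
  have hfun : (fun (q : Int × List Int) j =>
      (if (grid.getD j []).getD i 0 > q.1 then (grid.getD j []).getD i 0 else q.1,
       if (grid.getD j []).getD i 0 > q.2.getD j 0 then q.2.set j ((grid.getD j []).getD i 0)
         else q.2))
      = (fun (q : Int × List Int) j =>
      (if (grid.getD j []).getD i 0 > q.1 then (grid.getD j []).getD i 0 else q.1,
       pvUpd (fun j => (grid.getD j []).getD i 0) q.2 j)) := rfl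
  rw [hfun, pv_foldl_pair (List.range (grid.getD i []).length)
      (fun m j => if (grid.getD j []).getD i 0 > m then (grid.getD j []).getD i 0 else m)
      (pvUpd (fun j => (grid.getD j []).getD i 0)) 0 c]
  refine congrArg₂ _ ?_ rfl
  refine PySem.List.foldl_congr_mem _ _ _ _ ?_
  intro m j _
  rw [pv_ite_max]

theorem solution_570_5_eq (grid : List (List Int)) (h : Pre_solution_570_5 grid) :
    solution_570_5 grid = solution_570_5_alt grid := by
  unfold solution_570_5 solution_570_5_alt
  simp only [pv_inner_A, pv_inner_B]
  rw [pv_foldl_triple (List.range grid.length)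
      (fun a i => (List.range (grid.getD i []).length).foldl
          (fun t j => if (grid.getD i []).getD j 0 > 0 then t + 1 else t) a)
      (fun a i => a + (List.range (grid.getD i []).length).foldl
          (fun m j => max m ((grid.getD i []).getD j 0)) 0)
      (fun a i => a + (List.range (grid.getD i []).length).foldl
          (fun m j => max m ((grid.getD j []).getD i 0)) 0) 0 0 0,
    pv_foldl_pair (List.range grid.length)
      (fun a i => a + (List.range (grid.getD i []).length).foldl
          (fun m j => max m ((grid.getD j []).getD i 0)) 0)
      (fun c i => (List.range (grid.getD i []).length).foldl
          (pvUpd (fun j => (grid.getD j []).getD i 0)) c)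
      0 (List.replicate grid.length 0)]
  simp only
  -- the positive-count folds are equal
  have ht : (List.range grid.length).foldl
      (fun (a : Int) i => (List.range (grid.getD i []).length).foldl
        (fun (t : Int) j => if (grid.getD i []).getD j 0 > 0 then t + 1 else t) a) 0
      = grid.foldl (fun (t : Int) row => row.foldl (fun t v => if v > 0 then t + 1 else t) t) 0 := by
    rw [← pv_foldl_range_getD grid []
        (fun (t : Int) row => row.foldl (fun t v => if v > 0 then t + 1 else t) t) 0]
    refine PySem.List.foldl_congr_mem _ _ _ _ ?_
    intro a i _
    exact pv_foldl_range_getD (grid.getD i []) 0 (fun (t : Int) v => if v > 0 then t + 1 else t) a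
  -- A's sum of row maxes equals the sum of B's final row-max array
  have hs : (List.range grid.length).foldl
      (fun a i => a + (List.range (grid.getD i []).length).foldl
        (fun m j => max m ((grid.getD i []).getD j 0)) 0) 0
      = ((List.range grid.length).foldl
          (fun c i => (List.range (grid.getD i []).length).foldl
            (pvUpd (fun j => (grid.getD j []).getD i 0)) c)
          (List.replicate grid.length 0)).sum := by
    rw [pv_sum_range, pv_rowmax_length]
    apply pv_foldl_add_congr
    intro j hj
    rw [pv_rowmax_inv, if_pos hj,
      pv_G_eq_gather grid h j hj grid.length (le_refl _),
      Nat.min_eq_right (pv_L_le grid h j hj)]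
    rfl
  linarith [ht, hs]

-- ===== VERDICT (by name: the statement is the Claim_ definition above) =====
theorem solution_570_5_spec : Claim_equal_solution_570_5 := by
  intro grid _ hpre
  exact solution_570_5_eq grid hpre
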